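-- pv_equiv track=rewrite | github.com/rh-ecosystem-edge/neuron-ci | .github/scripts/neuron_operator_dashboard/fetch_ci_data.py | merge_tests
-- ===== SOURCE A (Python) =====
-- from typing import Any, Dict, List, Optional, Tuple, Set
--
-- OCP_FULL_VERSION = "ocp_full_version"
--
-- NEURON_OPERATOR_VERSION = "neuron_operator_version"
--
-- NEURON_DRIVER_VERSION = "neuron_driver_version"
--
-- STATUS_SUCCESS = "SUCCESS"
--
-- def merge_tests(
--     new_tests: List[Dict[str, Any]],
--     existing_tests: List[Dict[str, Any]],
-- ) -> List[Dict[str, Any]]: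
--     """Merge tests keeping one result per (OCP, operator, driver) combination."""
--     by_version: Dict[Tuple[str, str, str], List[Dict[str, Any]]] = {}
--
--     for item in existing_tests + new_tests:
--         key = (
--             item.get(OCP_FULL_VERSION, ""),
--             item.get(NEURON_OPERATOR_VERSION, ""),
--             item.get(NEURON_DRIVER_VERSION, ""),
--         )
--         by_version.setdefault(key, []).append(item)
--
--     final: List[Dict[str, Any]] = []
--     for version_results in by_version.values():
--         successes = [r for r in version_results if r.get("test_status") == STATUS_SUCCESS]
--         if successes:
--             chosen = max(successes, key=lambda r: int(r.get("job_timestamp", "0")))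
--         else:
--             chosen = max(version_results, key=lambda r: int(r.get("job_timestamp", "0")))
--         final.append(chosen)
--
--     final.sort(key=lambda x: int(x.get("job_timestamp", "0")), reverse=True)
--     return final
-- ===== SOURCE B (Python) =====
-- from typing import Any, Dict, List, Tuple
--
-- OCP_FULL_VERSION = "ocp_full_version"
-- NEURON_OPERATOR_VERSION = "neuron_operator_version"
-- NEURON_DRIVER_VERSION = "neuron_driver_version"
-- STATUS_SUCCESS = "SUCCESS"
--
--
-- def merge_tests(
--     new_tests: List[Dict[str, Any]],
--     existing_tests: List[Dict[str, Any]],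
-- ) -> List[Dict[str, Any]]:
--     """Merge tests keeping one result per (OCP, operator, driver) combination.
--
--     One pass per item: reduce successes online per version key (strict > so the
--     first maximal item wins ties like max), and keep pending failures only while
--     no success for that key has been seen; finish by choosing the reduced
--     success or, failing that, the latest pending failure, then sort.
--     """
--     def ts(r):
--         return int(r.get("job_timestamp", "0"))
--
--     state: Dict[Tuple[str, str, str], Tuple[Any, List[Dict[str, Any]]]] = {}
--     for item in existing_tests + new_tests:
--         k = (
--             item.get(OCP_FULL_VERSION, ""),
--             item.get(NEURON_OPERATOR_VERSION, ""),
--             item.get(NEURON_DRIVER_VERSION, ""),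
--         )
--         s, fl = state.get(k, (None, []))
--         if item.get("test_status") == STATUS_SUCCESS:
--             if s is None or ts(item) > ts(s):
--                 state[k] = (item, [])
--         else:
--             if s is None:
--                 state[k] = (None, fl + [item])
--
--     final = [s if s is not None else max(fl, key=ts) for s, fl in state.values()]
--     return sorted(final, key=ts, reverse=True)
-- ===== Notes on version B (the rewrite author's own statement) =====
-- stated objective: alternative
-- what changed: Replaces A's group-everything-into-lists-then-filter-and-pick-max-per-group structure by a single online pass that reduces successes per (OCP, operator, driver) key with strict > (first maximal wins ties like A's max) and keeps pending failures only until a success for that key appears; the finish picks the reduced success or the latest pending failure and sorts by timestamp descending.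
import Mathlib
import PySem

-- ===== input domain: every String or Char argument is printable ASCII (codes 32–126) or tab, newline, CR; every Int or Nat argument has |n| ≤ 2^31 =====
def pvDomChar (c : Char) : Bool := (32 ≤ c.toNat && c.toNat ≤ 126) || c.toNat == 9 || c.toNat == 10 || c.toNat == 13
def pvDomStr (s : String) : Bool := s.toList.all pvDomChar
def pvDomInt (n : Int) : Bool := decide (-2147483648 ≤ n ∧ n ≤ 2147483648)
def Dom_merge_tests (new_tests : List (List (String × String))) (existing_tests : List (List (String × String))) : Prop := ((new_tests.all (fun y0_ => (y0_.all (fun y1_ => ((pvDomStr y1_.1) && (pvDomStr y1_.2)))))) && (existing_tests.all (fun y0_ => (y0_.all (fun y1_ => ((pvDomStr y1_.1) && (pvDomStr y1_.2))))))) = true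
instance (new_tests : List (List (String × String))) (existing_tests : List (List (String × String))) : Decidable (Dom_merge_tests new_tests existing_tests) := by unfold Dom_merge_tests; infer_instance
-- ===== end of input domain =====

-- B replaces A's group-into-lists-then-pick-max-per-group structure by a single online pass that
-- reduces successes per version key and drops pending failures once a key has a success
-- (objective: alternative decomposition, same cost).

-- ===== PORT A =====
-- shared accessors, both Pythons use the same expressions:
-- int(r.get("job_timestamp", "0")); exact where the Python coercion succeeds (Pre_ ensures that
-- wherever either Python actually coerces)
def pvTs (r : List (String × String)) : Int :=
  (PySem.Int.ofStr? ((PySem.Dict.mk r).getD "job_timestamp" "0")).getD 0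

-- r.get("test_status") == STATUS_SUCCESS  (default None compares unequal)
def pvSucc (r : List (String × String)) : Bool :=
  (PySem.Dict.mk r).get? "test_status" == some "SUCCESS"

-- the (OCP, operator, driver) key tuple
def pvKey (r : List (String × String)) : String × String × String :=
  ((PySem.Dict.mk r).getD "ocp_full_version" "",
   (PySem.Dict.mk r).getD "neuron_operator_version" "",
   (PySem.Dict.mk r).getD "neuron_driver_version" "")

-- by_version.setdefault(key, []).append(item)
def stepA (d : PySem.Dict (String × String × String) (List (List (String × String))))
    (item : List (String × String)) :
    PySem.Dict (String × String × String) (List (List (String × String))) :=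
  d.modify (pvKey item) [] (· ++ [item])

-- the per-group body of A's second loop
def chooseA (g : List (List (String × String))) : List (String × String) :=
  let successes := g.filter pvSucc
  if successes.isEmpty = false then (PySem.List.max? successes pvTs).getD []
  else (PySem.List.max? g pvTs).getD []

def merge_tests (new_tests : List (List (String × String))) (existing_tests : List (List (String × String))) : List (List (String × String)) :=
  let by_version := (existing_tests ++ new_tests).foldl stepA PySem.Dict.empty
  let final := by_version.values.foldl (fun acc g => acc ++ [chooseA g]) []
  PySem.List.sorted final pvTs true

-- ===== PORT B =====
-- the loop body: s, fl = state.get(k, (None, [])); success → keep the strictly better success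
-- (dropping pending failures), failure → append to the pending failures only while s is None
def stepB (d : PySem.Dict (String × String × String)
      (Option (List (String × String)) × List (List (String × String))))
    (item : List (String × String)) :
    PySem.Dict (String × String × String)
      (Option (List (String × String)) × List (List (String × String))) :=
  let k := pvKey item
  let st := d.getD k (none, [])
  if pvSucc item then
    match st.1 with
    | none => d.insert k (some item, [])
    | some s => if pvTs s < pvTs item then d.insert k (some item, []) else d
  else
    match st.1 with
    | none => d.insert k (none, st.2 ++ [item])
    | some _ => d

-- s if s is not None else max(fl, key=ts)
def finalizeB (st : Option (List (String × String)) × List (List (String × String))) :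
    List (String × String) :=
  match st.1 with
  | some s => s
  | none => (PySem.List.max? st.2 pvTs).getD []

def merge_tests_alt (new_tests : List (List (String × String))) (existing_tests : List (List (String × String))) : List (List (String × String)) :=
  let state := (existing_tests ++ new_tests).foldl stepB PySem.Dict.empty
  PySem.List.sorted (state.values.map finalizeB) pvTs true

-- ===== PRECONDITION & SPEC =====
-- whether int(item.get("job_timestamp", "0")) succeeds in Python
def pvParse (item : List (String × String)) : Bool :=
  (PySem.Int.ofStr? ((PySem.Dict.mk item).getD "job_timestamp" "0")).isSome

-- Pre_ holds exactly where the Python A returns (elsewhere it raises ValueError): every SUCCESS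
-- item's job_timestamp must parse as an int, and a non-parsing item is tolerated only when some
-- SUCCESS item shares its version key (A then never coerces the non-parsing item's timestamp).
def Pre_merge_tests (new_tests : List (List (String × String))) (existing_tests : List (List (String × String))) : Prop :=
  ∀ item ∈ existing_tests ++ new_tests,
    (pvSucc item = true → pvParse item = true) ∧
    (pvParse item = false →
      ∃ j ∈ existing_tests ++ new_tests, pvSucc j = true ∧ pvKey j = pvKey item)
instance (new_tests : List (List (String × String))) (existing_tests : List (List (String × String))) : Decidable (Pre_merge_tests new_tests existing_tests) := by unfold Pre_merge_tests; infer_instance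

def pvWitness_merge_tests : (List (List (String × String))) × (List (List (String × String))) :=
  ([[("job_timestamp", "3"), ("test_status", "SUCCESS")]], [[("job_timestamp", "12")]])

def Spec_merge_tests (new_tests : List (List (String × String))) (existing_tests : List (List (String × String))) (out : List (List (String × String))) : Prop := out = merge_tests_alt new_tests existing_tests
instance (new_tests : List (List (String × String))) (existing_tests : List (List (String × String))) (out : List (List (String × String))) : Decidable (Spec_merge_tests new_tests existing_tests out) := by unfold Spec_merge_tests; infer_instance

-- ===== CLAIM (what is proved, stated in full; the proofs are below) =====
def Claim_equal_merge_tests : Prop := ∀ (new_tests : List (List (String × String))) (existing_tests : List (List (String × String))), Dom_merge_tests new_tests existing_tests → Pre_merge_tests new_tests existing_tests → Spec_merge_tests new_tests existing_tests (merge_tests new_tests existing_tests)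

-- ===== LEMMAS AND PROOFS =====

-- B's per-key state as a function of the key's group (its items in order)
def step0 (st : Option (List (String × String)) × List (List (String × String)))
    (x : List (String × String)) :
    Option (List (String × String)) × List (List (String × String)) :=
  if pvSucc x then
    match st.1 with
    | none => (some x, [])
    | some c => if pvTs c < pvTs x then (some x, []) else st
  else
    match st.1 with
    | none => (none, st.2 ++ [x])
    | some _ => st

def FSt (g : List (List (String × String))) :
    Option (List (String × String)) × List (List (String × String)) :=
  g.foldl step0 (none, [])

-- the per-entry relation between A's group dict and B's state dict
def fPair (p : (String × String × String) × List (List (String × String))) :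
    (String × String × String) ×
      (Option (List (String × String)) × List (List (String × String))) := (p.1, FSt p.2)

lemma FSt_snoc (g : List (List (String × String))) (x : List (String × String)) :
    FSt (g ++ [x]) = step0 (FSt g) x := by
  simp [FSt, List.foldl_append]

lemma max?_foldl_some {α : Type} (key : α → Int) :
    ∀ (t : List α) (c : α),
      t.foldl (fun acc x => match acc with
        | none => some x
        | some m => if key m < key x then some x else some m) (some c)
      = some (t.foldl (fun c x => if key c < key x then x else c) c) := by
  intro t
  induction t with
  | nil => intro c; rfl
  | cons a t ih => intro c; by_cases h : key c < key a <;> simp [h, ih]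

lemma max?_cons {α : Type} (key : α → Int) (h : α) (t : List α) :
    PySem.List.max? (h :: t) key = some (t.foldl (fun c x => if key c < key x then x else c) h) := by
  simp only [PySem.List.max?, List.foldl_cons]
  exact max?_foldl_some key t h

lemma max?_snoc {α : Type} (key : α → Int) (s : List α) (x : α) :
    PySem.List.max? (s ++ [x]) key
      = match PySem.List.max? s key with
        | none => some x
        | some m => if key m < key x then some x else some m := by
  simp only [PySem.List.max?, List.foldl_append, List.foldl_cons, List.foldl_nil]
  rfl

lemma max?_eq_none_iff {α : Type} (key : α → Int) (l : List α) :
    PySem.List.max? l key = none ↔ l = [] := by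
  cases l with
  | nil => simp [PySem.List.max?]
  | cons a t => simp [max?_cons key a t]

-- the per-key state is determined by the group: the best success if any, else all failures pending
lemma FSt_char (g : List (List (String × String))) :
    FSt g = match PySem.List.max? (g.filter pvSucc) pvTs with
      | none => (none, g)
      | some m => (some m, []) := by
  induction g using List.reverseRecOn with
  | nil => rfl
  | append_singleton g x ih =>
    rw [FSt_snoc, ih]
    by_cases hx : pvSucc x = true
    · have hfilt : (g ++ [x]).filter pvSucc = g.filter pvSucc ++ [x] := by
        simp [List.filter_append, hx]
      rw [hfilt, max?_snoc]
      cases hm : PySem.List.max? (g.filter pvSucc) pvTs with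
      | none => simp [step0, hx]
      | some m =>
        by_cases hlt : pvTs m < pvTs x <;> simp [step0, hx, hlt]
    · have hxf : pvSucc x = false := by simpa using hx
      have hfilt : (g ++ [x]).filter pvSucc = g.filter pvSucc := by
        simp [List.filter_append, hxf]
      rw [hfilt]
      cases hm : PySem.List.max? (g.filter pvSucc) pvTs with
      | none => simp [step0, hxf]
      | some m => simp [step0, hxf]

-- A's per-group choice equals B's finalization of the per-key state
lemma chooseA_eq_finalize (g : List (List (String × String))) :
    chooseA g = finalizeB (FSt g) := by
  rw [FSt_char]
  cases hm : PySem.List.max? (g.filter pvSucc) pvTs with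
  | none =>
    have hnil : g.filter pvSucc = [] := (max?_eq_none_iff pvTs _).mp hm
    simp [chooseA, finalizeB, hnil]
  | some m =>
    have hne : g.filter pvSucc ≠ [] := by
      intro h; rw [h] at hm; simp [PySem.List.max?] at hm
    have hie : (g.filter pvSucc).isEmpty = false := by
      simpa [List.isEmpty_iff] using hne
    simp [chooseA, finalizeB, hie, hm]

-- find? through the fst-preserving map fPair
lemma find?_fPair (L : List ((String × String × String) × List (List (String × String))))
    (k : String × String × String) :
    List.find? (fun p => p.1 == k) (L.map fPair)
      = (List.find? (fun p => p.1 == k) L).map fPair := by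
  rw [List.find?_map]
  rfl

lemma mem_eq_of_nodup_fst {α β : Type} :
    ∀ (L : List (α × β)), (L.map Prod.fst).Nodup →
      ∀ p ∈ L, ∀ q ∈ L, p.1 = q.1 → p = q := by
  intro L
  induction L with
  | nil => intro _ p hp; simp at hp
  | cons a t ih =>
    intro hnd p hp q hq hpq
    simp only [List.map_cons, List.nodup_cons] at hnd
    rcases List.mem_cons.mp hp with hp1 | hp1 <;> rcases List.mem_cons.mp hq with hq1 | hq1
    · rw [hp1, hq1]
    · exfalso; exact hnd.1 (by rw [hp1] at hpq; rw [hpq]; exact List.mem_map_of_mem hq1)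
    · exfalso; exact hnd.1 (by rw [hq1] at hpq; rw [← hpq]; exact List.mem_map_of_mem hp1)
    · exact ih hnd.2 p hp1 q hq1 hpq

lemma step_commute (d : PySem.Dict (String × String × String) (List (List (String × String))))
    (item : List (String × String)) (hnd : d.keys.Nodup) :
    stepB (PySem.Dict.mk (d.items.map fPair)) item
      = PySem.Dict.mk ((stepA d item).items.map fPair) := by
  have hget : (PySem.Dict.mk (d.items.map fPair)).get? (pvKey item)
      = (d.get? (pvKey item)).map (fun g => FSt g) := by
    simp only [PySem.Dict.get?, find?_fPair, Option.map_map]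
    rfl
  cases hfind : d.get? (pvKey item) with
  | none =>
    have hcont : d.contains (pvKey item) = false := by
      rw [PySem.Dict.contains_eq_isSome_get?, hfind]; rfl
    have hcontB : (PySem.Dict.mk (d.items.map fPair)).contains (pvKey item) = false := by
      rw [PySem.Dict.contains_eq_isSome_get?, hget, hfind]; rfl
    have hgd : d.getD (pvKey item) [] = [] := by
      simp [PySem.Dict.getD_eq_get?_getD, hfind]
    have hgdB : (PySem.Dict.mk (d.items.map fPair)).getD (pvKey item) (none, []) = (none, []) := by
      simp [PySem.Dict.getD_eq_get?_getD, hget, hfind]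
    -- both sides append a fresh entry for the key; the appended values correspond
    have hA : (stepA d item).items = d.items ++ [(pvKey item, [item])] := by
      simp only [stepA, PySem.Dict.modify, hgd]
      simpa using PySem.Dict.items_insert_of_not_contains d _ hcont
    by_cases hx : pvSucc item = true
    · simp only [stepB, hgdB, hx, if_pos]
      rw [hA]
      apply PySem.Dict.ext
      rw [PySem.Dict.items_insert_of_not_contains _ _ hcontB]
      simp [fPair, FSt, step0, hx]
    · have hxf : pvSucc item = false := by simpa using hx
      simp only [stepB, hgdB, hxf, Bool.false_eq_true, if_false]
      rw [hA]
      apply PySem.Dict.ext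
      rw [PySem.Dict.items_insert_of_not_contains _ _ hcontB]
      simp [fPair, FSt, step0, hxf]
  | some g =>
    have hcont : d.contains (pvKey item) = true := by
      rw [PySem.Dict.contains_eq_isSome_get?, hfind]; rfl
    have hcontB : (PySem.Dict.mk (d.items.map fPair)).contains (pvKey item) = true := by
      rw [PySem.Dict.contains_eq_isSome_get?, hget, hfind]; rfl
    have hgd : d.getD (pvKey item) [] = g := by
      simp [PySem.Dict.getD_eq_get?_getD, hfind]
    have hgdB : (PySem.Dict.mk (d.items.map fPair)).getD (pvKey item) (none, []) = FSt g := by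
      simp [PySem.Dict.getD_eq_get?_getD, hget, hfind]
    have hentry : ∀ p ∈ d.items, (p.1 == pvKey item) = true → p = (pvKey item, g) := by
      intro p hp hpk
      have hkg : (pvKey item, g) ∈ d.items := PySem.Dict.mem_items_of_get?_eq_some _ hfind
      exact mem_eq_of_nodup_fst d.items hnd p hp (pvKey item, g) hkg (by simpa using hpk)
    have hA : (stepA d item).items
        = d.items.map (fun p => if (p.1 == pvKey item) = true then (pvKey item, g ++ [item]) else p) := by
      simp only [stepA, PySem.Dict.modify, hgd]
      exact PySem.Dict.items_insert_of_contains d _ hcont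
    -- common continuation: when B writes, both sides update the key's entry in place
    have hwrite : ∀ v, v = FSt (g ++ [item]) →
        (PySem.Dict.mk (d.items.map fPair)).insert (pvKey item) v
          = PySem.Dict.mk ((stepA d item).items.map fPair) := by
      intro v hv
      apply PySem.Dict.ext
      rw [PySem.Dict.items_insert_of_contains _ _ hcontB, hA]
      show (d.items.map fPair).map
            (fun p => if (p.1 == pvKey item) = true then (pvKey item, v) else p)
          = (d.items.map
              (fun p => if (p.1 == pvKey item) = true then (pvKey item, g ++ [item]) else p)).map fPair
      simp only [List.map_map]
      apply List.map_congr_left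
      intro p hp
      by_cases hpk : (p.1 == pvKey item) = true
      · simp [Function.comp, fPair, hpk, hv]
      · simp [Function.comp, fPair, hpk]
    -- when B keeps d, A's updated entry maps to the same pair as the old entry
    have hkeep : FSt (g ++ [item]) = FSt g →
        PySem.Dict.mk (d.items.map fPair) = PySem.Dict.mk ((stepA d item).items.map fPair) := by
      intro hsame
      apply PySem.Dict.ext
      rw [hA]
      show d.items.map fPair
          = (d.items.map
              (fun p => if (p.1 == pvKey item) = true then (pvKey item, g ++ [item]) else p)).map fPair
      simp only [List.map_map]
      apply List.map_congr_left
      intro p hp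
      by_cases hpk : (p.1 == pvKey item) = true
      · have hpe : p = (pvKey item, g) := hentry p hp hpk
        simp only [Function.comp, hpk, if_true]
        rw [hpe]
        simp [fPair, hsame]
      · simp [Function.comp, hpk]
    have hFsnoc : FSt (g ++ [item]) = step0 (FSt g) item := FSt_snoc g item
    by_cases hx : pvSucc item = true
    · cases hS : (FSt g).1 with
      | none =>
        simp only [stepB, hgdB, hx, if_pos, hS]
        exact hwrite _ (by rw [hFsnoc]; simp [step0, hx, hS])
      | some c =>
        by_cases hlt : pvTs c < pvTs item
        · simp only [stepB, hgdB, hx, if_pos, hS, if_pos hlt]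
          exact hwrite _ (by rw [hFsnoc]; simp [step0, hx, hS, hlt])
        · simp only [stepB, hgdB, hx, if_pos, hS, if_neg hlt]
          apply hkeep
          rw [hFsnoc]; simp [step0, hx, hS, hlt]
    · have hxf : pvSucc item = false := by simpa using hx
      cases hS : (FSt g).1 with
      | none =>
        simp only [stepB, hgdB, hxf, hS]
        exact hwrite _ (by rw [hFsnoc]; simp [step0, hxf, hS])
      | some c =>
        simp only [stepB, hgdB, hxf, hS]
        apply hkeep
        rw [hFsnoc]; simp [step0, hxf, hS]

lemma stepA_keys_nodup (d : PySem.Dict (String × String × String) (List (List (String × String))))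
    (item : List (String × String)) (hnd : d.keys.Nodup) : (stepA d item).keys.Nodup := by
  simpa [stepA, PySem.Dict.modify] using PySem.Dict.nodup_keys_insert _ _ _ hnd

lemma inv (l : List (List (String × String))) :
    ∀ (d : PySem.Dict (String × String × String) (List (List (String × String)))),
      d.keys.Nodup →
      l.foldl stepB (PySem.Dict.mk (d.items.map fPair))
        = PySem.Dict.mk ((l.foldl stepA d).items.map fPair) := by
  induction l with
  | nil => intro d _; rfl
  | cons item t ih =>
    intro d hnd
    simp only [List.foldl_cons]
    rw [step_commute d item hnd]
    exact ih (stepA d item) (stepA_keys_nodup d item hnd)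

lemma presort_eq (l : List (List (String × String))) :
    ((l.foldl stepB PySem.Dict.empty).values).map finalizeB
      = ((l.foldl stepA PySem.Dict.empty).values).foldl (fun acc g => acc ++ [chooseA g]) [] := by
  have h0 : (PySem.Dict.empty :
      PySem.Dict (String × String × String) (List (List (String × String)))).items = [] := rfl
  have hinv := inv l PySem.Dict.empty (by simp [PySem.Dict.keys, h0])
  have hstart : PySem.Dict.mk
      (((PySem.Dict.empty : PySem.Dict (String × String × String)
        (List (List (String × String)))).items).map fPair)
      = (PySem.Dict.empty : PySem.Dict (String × String × String)
          (Option (List (String × String)) × List (List (String × String)))) := rfl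
  rw [hstart] at hinv
  rw [hinv]
  rw [PySem.List.foldl_append_singleton_eq_map, List.nil_append]
  simp only [PySem.Dict.values, List.map_map]
  apply List.map_congr_left
  intro p _
  simp [Function.comp, fPair, chooseA_eq_finalize p.2]

-- ===== VERDICT (by name: the statement is the Claim_ definition above) =====
theorem merge_tests_spec : Claim_equal_merge_tests := by
  intro new_tests existing_tests _ _
  show merge_tests new_tests existing_tests = merge_tests_alt new_tests existing_tests
  show PySem.List.sorted
      (((existing_tests ++ new_tests).foldl stepA PySem.Dict.empty).values.foldl
        (fun acc g => acc ++ [chooseA g]) []) pvTs true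
    = PySem.List.sorted
      (((existing_tests ++ new_tests).foldl stepB PySem.Dict.empty).values.map finalizeB) pvTs true
  rw [presort_eq (existing_tests ++ new_tests)]
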